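-- pv_equiv track=rewrite | github.com/pypi-data/pypi-mirror-403 | packages/gutenfetchen/gutenfetchen-1.2.0-py3-none-any.whl/gutenfetchen/cleaner.py | _normalize_allcaps_headings
-- ===== SOURCE A (Python) =====
-- def _normalize_allcaps_headings(lines: list[str]) -> list[str]:
--     """Convert ALL CAPS heading lines to title case and ensure blank-line isolation.
--
--     A line qualifies as an ALL CAPS heading when:
--       - it contains at least one letter,
--       - every letter on the line is uppercase (ignoring digits, punctuation,
--         whitespace, and Roman-numeral decorations like periods or dashes), and
--       - it is not *only* whitespace/punctuation (must have alphabetic content).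
--
--     Qualifying lines are converted to title case.  If the line above or below
--     is non-blank, a blank line is inserted so downstream tools treat the
--     heading as a separate paragraph.
--
--     Returns a new list of lines.
--     """
--     result: list[str] = []
--     for i, line in enumerate(lines):
--         stripped = line.strip()
--
--         # Skip blank lines — pass through unchanged.
--         if not stripped:
--             result.append(line)
--             continue
--
--         # Check whether every letter on the line is uppercase.
--         letters = [ch for ch in stripped if ch.isalpha()]
--         is_allcaps = len(letters) >= 2 and all(ch.isupper() for ch in letters)
--
--         if is_allcaps:
--             # Convert to title case, preserving original trailing whitespace.
--             title_line = stripped.title() + "\n"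
--
--             # Ensure a blank line *before* the heading if the previous line
--             # is non-blank (and we already emitted at least one line).
--             if result and result[-1].strip():
--                 result.append("\n")
--
--             result.append(title_line)
--
--             # Ensure a blank line *after* the heading if the next line exists
--             # and is non-blank.
--             next_idx = i + 1
--             if next_idx < len(lines) and lines[next_idx].strip():
--                 result.append("\n")
--         else:
--             result.append(line)
--
--     return result
-- ===== SOURCE B (Python) =====
-- def _is_heading(line: str) -> bool:
--     letters = [ch for ch in line.strip() if ch.isalpha()]
--     return len(letters) >= 2 and all(ch.isupper() for ch in letters)
--
--
-- def _segment(prev, line, nxt):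
--     stripped = line.strip()
--     if not stripped:
--         return [line]
--     if not _is_heading(line):
--         return [line]
--     seg = []
--     if prev is not None and prev.strip() and not _is_heading(prev):
--         seg.append("\n")
--     seg.append(stripped.title() + "\n")
--     if nxt is not None and nxt.strip():
--         seg.append("\n")
--     return seg
--
--
-- def _normalize_allcaps_headings(lines: list[str]) -> list[str]:
--     prevs = [None] + lines[:-1]
--     nexts = lines[1:] + [None]
--     out: list[str] = []
--     for prev, line, nxt in zip(prevs, lines, nexts):
--         out.extend(_segment(prev, line, nxt))
--     return out
-- ===== Notes on version B (the rewrite author's own statement) =====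
-- stated objective: alternative
-- what changed: A's single stateful loop that inspects its own output (result[-1].strip()) to decide blank insertion is replaced by a stateless flatMap: each line is mapped, via a zip with its previous and next neighbours, to a locally computed segment, so the output list is never consulted.
import Mathlib
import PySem

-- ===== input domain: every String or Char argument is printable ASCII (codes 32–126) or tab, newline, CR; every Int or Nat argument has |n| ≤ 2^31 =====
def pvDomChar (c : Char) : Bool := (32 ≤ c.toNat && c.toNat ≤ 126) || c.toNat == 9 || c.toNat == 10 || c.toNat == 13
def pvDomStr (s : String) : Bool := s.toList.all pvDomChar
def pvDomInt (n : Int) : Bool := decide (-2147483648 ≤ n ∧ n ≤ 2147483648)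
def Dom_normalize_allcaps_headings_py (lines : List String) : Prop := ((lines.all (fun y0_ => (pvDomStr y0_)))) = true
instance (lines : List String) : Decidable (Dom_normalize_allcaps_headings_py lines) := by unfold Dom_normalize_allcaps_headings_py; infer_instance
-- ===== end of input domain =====

-- B replaces A's stateful accumulator (inspecting result[-1]) by a stateless per-line
-- segment computed from the (prev, line, next) neighbour triple; objective: alternative.

-- ===== PORT A =====
-- hand port of str.title(), exact on the ASCII domain: a letter following a letter is
-- lowercased, a letter following a non-letter (or at the start) is uppercased
def pvTitleGo : List Char → Bool → List Char
  | [], _ => []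
  | c :: cs, prevAlpha =>
    if PySem.Chars.isalpha c then
      (if prevAlpha then PySem.Chars.lowerChar c else PySem.Chars.upperChar c) :: pvTitleGo cs true
    else c :: pvTitleGo cs false

-- A's loop over `lines` with its `result` accumulator; `rest` is lines[i+1:], so the
-- `next_idx < len(lines) and lines[next_idx].strip()` test reads the head of `rest`
def pvALoop (res : List String) : List String → List String
  | [] => res
  | line :: rest =>
    let stripped := PySem.Str.strip line
    if stripped == "" then pvALoop (res ++ [line]) rest
    else
      let letters := stripped.toList.filter PySem.Chars.isalpha
      if decide (2 ≤ letters.length) && letters.all PySem.Chars.isupper then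
        let title_line := String.ofList (pvTitleGo stripped.toList false ++ ['\n'])
        let res1 := if !res.isEmpty && !(PySem.Str.strip (PySem.List.pyGetD res (-1) "") == "")
                    then res ++ ["\n"] else res
        let res2 := res1 ++ [title_line]
        let res3 := match rest with
          | next :: _ => if !(PySem.Str.strip next == "") then res2 ++ ["\n"] else res2
          | [] => res2
        pvALoop res3 rest
      else pvALoop (res ++ [line]) rest

def normalize_allcaps_headings_py (lines : List String) : List String :=
  pvALoop [] lines

-- ===== PORT B =====
def pvIsHeading (line : String) : Bool :=
  let letters := (PySem.Str.strip line).toList.filter PySem.Chars.isalpha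
  decide (2 ≤ letters.length) && letters.all PySem.Chars.isupper

def pvSegment (prev : Option String) (line : String) (next : Option String) : List String :=
  let stripped := PySem.Str.strip line
  if stripped == "" then [line]
  else if !pvIsHeading line then [line]
  else
    (match prev with
     | some p => if !(PySem.Str.strip p == "") && !pvIsHeading p then ["\n"] else []
     | none => []) ++
    [String.ofList (pvTitleGo stripped.toList false ++ ['\n'])] ++
    (match next with
     | some n => if !(PySem.Str.strip n == "") then ["\n"] else []
     | none => [])

def normalize_allcaps_headings_py_alt (lines : List String) : List String :=
  let prevs : List (Option String) := none :: (PySem.List.slice lines none (some (-1))).map some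
  let nexts : List (Option String) := (PySem.List.slice lines (some 1) none).map some ++ [none]
  ((prevs.zip lines).zip nexts).foldl (fun acc t => acc ++ pvSegment t.1.1 t.1.2 t.2) []

-- ===== PRECONDITION & SPEC =====
def Spec_normalize_allcaps_headings_py (lines : List String) (out : List String) : Prop := out = normalize_allcaps_headings_py_alt lines
instance (lines : List String) (out : List String) : Decidable (Spec_normalize_allcaps_headings_py lines out) := by unfold Spec_normalize_allcaps_headings_py; infer_instance

-- ===== CLAIM (what is proved, stated in full; the proofs are below) =====
def Claim_equal_normalize_allcaps_headings_py : Prop := ∀ (lines : List String), Dom_normalize_allcaps_headings_py lines → Spec_normalize_allcaps_headings_py lines (normalize_allcaps_headings_py lines)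

-- ===== LEMMAS AND PROOFS =====

-- the (prev, line, next) triples B zips together, as a recursion
def pvTrip (prev : Option String) : List String → List ((Option String × String) × Option String)
  | [] => []
  | l :: rest => ((prev, l), rest.head?) :: pvTrip (some l) rest

-- does A's `result` end in a non-blank line? (A's `result and result[-1].strip()` test)
def pvLastNB (res : List String) : Bool :=
  !res.isEmpty && !(PySem.Str.strip (PySem.List.pyGetD res (-1) "") == "")

-- B's before-blank condition on the previous line
def pvPrevC (prev : Option String) : Bool :=
  match prev with
  | some p => !(PySem.Str.strip p == "") && !pvIsHeading p
  | none => false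

lemma pvZip_eq_trip : ∀ (xs : List String) (p : Option String),
    ((p :: xs.dropLast.map some).zip xs).zip (xs.tail.map some ++ [none]) = pvTrip p xs := by
  intro xs
  induction xs with
  | nil => intro p; rfl
  | cons l rest ih =>
    intro p
    cases rest with
    | nil => rfl
    | cons r rs =>
      simp only [List.dropLast, List.map_cons, List.zip_cons_cons, List.tail_cons,
        List.cons_append, pvTrip, List.head?_cons, List.cons.injEq]
      exact ⟨trivial, ih (some l)⟩

lemma pvLastNB_append (res : List String) (x : String) :
    pvLastNB (res ++ [x]) = !(PySem.Str.strip x == "") := by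
  simp [pvLastNB, PySem.List.pyGetD_neg_one_append_singleton]

lemma pvIsHeading_nonblank (s : String) (h : pvIsHeading s = true) :
    (PySem.Str.strip s == "") = false := by
  cases hx : (PySem.Str.strip s == "") with
  | false => rfl
  | true =>
    exfalso
    have hs : PySem.Str.strip s = "" := by simpa using hx
    rw [pvIsHeading, hs] at h
    simp at h

lemma pvALoop_blank (res : List String) (line : String) (rest : List String)
    (hb : (PySem.Str.strip line == "") = true) :
    pvALoop res (line :: rest) = pvALoop (res ++ [line]) rest := by
  simp [pvALoop, hb]

lemma pvALoop_plain (res : List String) (line : String) (rest : List String)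
    (hb : (PySem.Str.strip line == "") = false) (hh : pvIsHeading line = false) :
    pvALoop res (line :: rest) = pvALoop (res ++ [line]) rest := by
  have hh' := hh
  unfold pvIsHeading at hh'
  simp only [pvALoop, hb, Bool.false_eq_true, if_false, hh']

set_option maxHeartbeats 2000000 in
lemma pvALoop_heading (res : List String) (line : String) (rest : List String)
    (hb : (PySem.Str.strip line == "") = false) (hh : pvIsHeading line = true) :
    pvALoop res (line :: rest) =
      pvALoop (res ++ ((if pvLastNB res then ["\n"] else []) ++
        [String.ofList (pvTitleGo (PySem.Str.strip line).toList false ++ ['\n'])] ++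
        (match rest.head? with
         | some n => if !(PySem.Str.strip n == "") then ["\n"] else []
         | none => []))) rest := by
  have hh' := hh
  unfold pvIsHeading at hh'
  rw [pvALoop.eq_def]
  simp only [hb, Bool.false_eq_true, if_false, hh', if_true]
  congr 1
  cases rest with
  | nil =>
    cases hl : pvLastNB res <;> simp only [pvLastNB] at hl <;> simp [hl]
  | cons n rs =>
    cases hl : pvLastNB res <;> simp only [pvLastNB] at hl <;>
      cases hn : (PySem.Str.strip n == "") <;> simp [hl, hn]

lemma pvSegment_heading (prev : Option String) (line : String) (next : Option String)
    (hb : (PySem.Str.strip line == "") = false) (hh : pvIsHeading line = true) :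
    pvSegment prev line next =
      (if pvPrevC prev then ["\n"] else []) ++
      [String.ofList (pvTitleGo (PySem.Str.strip line).toList false ++ ['\n'])] ++
      (match next with
       | some n => if !(PySem.Str.strip n == "") then ["\n"] else []
       | none => []) := by
  cases prev <;> simp [pvSegment, hb, hh, pvPrevC]

-- loop invariant: whenever the next line to process is a heading, A's result[-1]-test
-- agrees with B's previous-line condition
lemma pvALoop_eq : ∀ (ls : List String) (prev : Option String) (res : List String),
    (∀ hd, ls.head? = some hd → pvIsHeading hd = true → pvLastNB res = pvPrevC prev) →
    pvALoop res ls = res ++ (pvTrip prev ls).flatMap (fun t => pvSegment t.1.1 t.1.2 t.2) := by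
  intro ls
  induction ls with
  | nil => intro prev res _; simp [pvALoop, pvTrip]
  | cons line rest ih =>
    intro prev res h
    cases hb : (PySem.Str.strip line == "") with
    | true =>
      have hb' : PySem.Str.strip line = "" := by simpa using hb
      rw [pvALoop_blank res line rest hb,
        ih (some line) (res ++ [line])
          (by intro hd _ _; rw [pvLastNB_append, hb]; simp [pvPrevC, hb])]
      simp [pvTrip, pvSegment, hb']
    | false =>
      cases hh : pvIsHeading line with
      | false =>
        rw [pvALoop_plain res line rest hb hh,
          ih (some line) (res ++ [line])
            (by intro hd _ _; rw [pvLastNB_append, hb]; simp [pvPrevC, hb, hh])]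
        have hb' : ¬ PySem.Str.strip line = "" := by simpa using hb
        simp [pvTrip, pvSegment, hb', hh]
      | true =>
        have hcond : pvLastNB res = pvPrevC prev := h line rfl hh
        rw [pvALoop_heading res line rest hb hh, hcond]
        rw [ih (some line)
            (res ++ ((if pvPrevC prev then ["\n"] else []) ++
              [String.ofList (pvTitleGo (PySem.Str.strip line).toList false ++ ['\n'])] ++
              (match rest.head? with
               | some n => if !(PySem.Str.strip n == "") then ["\n"] else []
               | none => [])))
            ?_]
        · rw [pvTrip, List.flatMap_cons, pvSegment_heading prev line rest.head? hb hh,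
            List.append_assoc]
        · intro hd hhd hheadhd
          have hpc : pvPrevC (some line) = false := by simp [pvPrevC, hh]
          cases rest with
          | nil => simp at hhd
          | cons n rs =>
            have hn : n = hd := by simpa using hhd
            subst hn
            have hnb : (PySem.Str.strip n == "") = false := pvIsHeading_nonblank n hheadhd
            rw [hpc]
            simp only [List.head?_cons, hnb, Bool.not_false, if_true]
            rw [show (if pvPrevC prev then ["\n"] else []) ++
                [String.ofList (pvTitleGo (PySem.Str.strip line).toList false ++ ['\n'])] ++ ["\n"] =
                ((if pvPrevC prev then ["\n"] else []) ++
                 [String.ofList (pvTitleGo (PySem.Str.strip line).toList false ++ ['\n'])]) ++ ["\n"]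
              from by simp, ← List.append_assoc, pvLastNB_append]
            decide

-- ===== VERDICT (by name: the statement is the Claim_ definition above) =====
theorem normalize_allcaps_headings_py_spec : Claim_equal_normalize_allcaps_headings_py := by
  intro lines _
  unfold Spec_normalize_allcaps_headings_py normalize_allcaps_headings_py
  simp only [normalize_allcaps_headings_py_alt]
  have hslice1 : PySem.List.slice lines none (some (-1)) = lines.dropLast := by simp [pysem]
  have hslice2 : PySem.List.slice lines (some 1) none = lines.tail := by simp [pysem]
  rw [hslice1, hslice2, pvZip_eq_trip lines none, ← List.flatMap_eq_foldl]
  rw [pvALoop_eq lines none [] (by intro hd _ _; rfl)]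
  rfl
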